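-- pv_equiv track=rewrite | github.com/joshuawendorf21310/Adaptix-EPCR-Service | backend/nemsis_test/ref/parse_dict.py | detect_section_boundaries
-- ===== SOURCE A (Python) =====
-- SECTION_HEADERS = {
--     "Definition",
--     "Constraints",
--     "Code List",
--     "Data Element Comment",
--     "Version 3 Changes Implemented",
--     "Element Deprecated",
--     "Associated Performance Measure Initiatives",
--     "Associated Validation Rules",
--     "Attributes",
-- }
--
-- def detect_section_boundaries(lines: list[str]) -> list[tuple[str, int, int]]:
--     """Return (section_name, start_idx_inclusive, end_idx_exclusive)."""
--     bounds: list[tuple[str, int]] = []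
--     for i, line in enumerate(lines):
--         if line in SECTION_HEADERS:
--             bounds.append((line, i))
--     sections: list[tuple[str, int, int]] = []
--     for j, (name, start) in enumerate(bounds):
--         end = bounds[j + 1][1] if j + 1 < len(bounds) else len(lines)
--         sections.append((name, start + 1, end))
--     return sections
-- ===== SOURCE B (Python) =====
-- SECTION_HEADERS = {
--     "Definition",
--     "Constraints",
--     "Code List",
--     "Data Element Comment",
--     "Version 3 Changes Implemented",
--     "Element Deprecated",
--     "Associated Performance Measure Initiatives",
--     "Associated Validation Rules",
--     "Attributes",
-- }
--
-- def detect_section_boundaries(lines: list[str]) -> list[tuple[str, int, int]]: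
--     """Return (section_name, start_idx_inclusive, end_idx_exclusive)."""
--     sections: list[tuple[str, int, int]] = []
--     pending = None  # open section: (name, start_index_of_header)
--     for i, line in enumerate(lines):
--         if line in SECTION_HEADERS:
--             if pending is not None:
--                 sections.append((pending[0], pending[1] + 1, i))
--             pending = (line, i)
--     if pending is not None:
--         sections.append((pending[0], pending[1] + 1, len(lines)))
--     return sections
-- ===== Notes on version B (the rewrite author's own statement) =====
-- stated objective: simpler
-- what changed: Single pass that closes the pending open section whenever the next header appears (flushing the last one after the loop), instead of first materialising a bounds list and then re-walking it with an index lookahead bounds[j+1].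
import Mathlib
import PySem

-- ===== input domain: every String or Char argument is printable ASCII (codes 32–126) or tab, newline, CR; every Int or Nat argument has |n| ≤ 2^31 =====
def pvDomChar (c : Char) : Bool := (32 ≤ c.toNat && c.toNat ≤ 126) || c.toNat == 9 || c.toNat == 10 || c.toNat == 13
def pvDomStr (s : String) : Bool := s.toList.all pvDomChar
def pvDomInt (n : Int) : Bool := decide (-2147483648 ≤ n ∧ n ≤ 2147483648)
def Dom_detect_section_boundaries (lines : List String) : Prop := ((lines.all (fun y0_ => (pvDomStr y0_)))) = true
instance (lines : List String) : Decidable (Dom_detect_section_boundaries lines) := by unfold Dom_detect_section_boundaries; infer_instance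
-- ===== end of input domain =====

-- B replaces A's two passes (collect header positions, then re-walk them with a bounds[j+1]
-- lookahead) by one pass holding the pending open section and flushing it at each next header.

-- SECTION_HEADERS (a set of string constants; membership test only)
def pvHeaders : List String :=
  ["Definition", "Constraints", "Code List", "Data Element Comment",
   "Version 3 Changes Implemented", "Element Deprecated",
   "Associated Performance Measure Initiatives", "Associated Validation Rules",
   "Attributes"]

-- ===== PORT A =====
def detect_section_boundaries (lines : List String) : List (String × Int × Int) :=
  let bounds : List (String × Int) :=
    (PySem.List.enumerate lines).foldl
      (fun acc p => if pvHeaders.contains p.2 then acc ++ [(p.2, p.1)] else acc) []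
  (PySem.List.enumerate bounds).foldl
    (fun sections p =>
      -- bounds[j+1][1] if j+1 < len(bounds) else len(lines); the index is in range by the guard
      let e : Int :=
        if p.1 + 1 < (bounds.length : Int) then
          ((PySem.List.pyGet? bounds (p.1 + 1)).map (·.2)).getD 0
        else (lines.length : Int)
      sections ++ [(p.2.1, p.2.2 + 1, e)]) []

-- ===== PORT B =====
def detect_section_boundaries_alt (lines : List String) : List (String × Int × Int) :=
  let st :=
    (PySem.List.enumerate lines).foldl
      (fun (st : List (String × Int × Int) × Option (String × Int)) p =>
        if pvHeaders.contains p.2 then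
          (match st.2 with
           | some q => st.1 ++ [(q.1, q.2 + 1, p.1)]
           | none => st.1,
           some (p.2, p.1))
        else st)
      ([], none)
  match st.2 with
  | some q => st.1 ++ [(q.1, q.2 + 1, (lines.length : Int))]
  | none => st.1

-- ===== PRECONDITION & SPEC =====
def Spec_detect_section_boundaries (lines : List String) (out : List (String × Int × Int)) : Prop := out = detect_section_boundaries_alt lines
instance (lines : List String) (out : List (String × Int × Int)) : Decidable (Spec_detect_section_boundaries lines out) := by unfold Spec_detect_section_boundaries; infer_instance

-- ===== CLAIM (what is proved, stated in full; the proofs are below) =====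
def Claim_equal_detect_section_boundaries : Prop := ∀ (lines : List String), Dom_detect_section_boundaries lines → Spec_detect_section_boundaries lines (detect_section_boundaries lines)

-- ===== LEMMAS AND PROOFS =====

-- the list of (header line, index), starting at index i
def pvBoundsFrom (lines : List String) (i : Int) : List (String × Int) :=
  match lines with
  | [] => []
  | l :: ls =>
    if pvHeaders.contains l then (l, i) :: pvBoundsFrom ls (i + 1)
    else pvBoundsFrom ls (i + 1)

-- the sections determined by a bounds list, with final end n
def pvMk (bs : List (String × Int)) (n : Int) : List (String × Int × Int) :=
  match bs with
  | [] => []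
  | [q] => [(q.1, q.2 + 1, n)]
  | q :: b :: r => (q.1, q.2 + 1, b.2) :: pvMk (b :: r) n

lemma pvBoundsFold (lines : List String) (i : Int) (acc : List (String × Int)) :
    (PySem.List.enumerate lines i).foldl
      (fun acc p => if pvHeaders.contains p.2 then acc ++ [(p.2, p.1)] else acc) acc
      = acc ++ pvBoundsFrom lines i := by
  induction lines generalizing i acc with
  | nil => simp [PySem.List.enumerate_nil, pvBoundsFrom]
  | cons l ls ih =>
    rw [PySem.List.enumerate_cons]
    simp only [List.foldl_cons, pvBoundsFrom]
    by_cases h : pvHeaders.contains l = true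
    · rw [if_pos h, if_pos h, ih]
      simp
    · rw [if_neg h, if_neg h, ih]

lemma pvSecFold (n : Int) (bs : List (String × Int)) :
    ∀ (suf pre : List (String × Int)) (k : Int), pre ++ suf = bs → k = (pre.length : Int) →
    ∀ (acc : List (String × Int × Int)),
    (PySem.List.enumerate suf k).foldl
      (fun sections p =>
        sections ++
          [(p.2.1, p.2.2 + 1,
            if p.1 + 1 < (bs.length : Int) then
              ((PySem.List.pyGet? bs (p.1 + 1)).map (·.2)).getD 0
            else n)]) acc
      = acc ++ pvMk suf n := by
  intro suf
  induction suf with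
  | nil => intro pre k _ _ acc; simp [PySem.List.enumerate_nil, pvMk]
  | cons a t ih =>
    intro pre k hpre hk acc
    subst hk
    rw [PySem.List.enumerate_cons]
    simp only [List.foldl_cons]
    have ht := ih (pre ++ [a]) ((pre.length : Int) + 1) (by simpa using hpre)
      (by simp only [List.length_append, List.length_cons, List.length_nil]; push_cast; omega)
    cases t with
    | nil =>
      have hb : ¬ ((pre.length : Int) + 1 < (bs.length : Int)) := by
        subst hpre; simp only [List.length_append, List.length_cons, List.length_nil]; push_cast; omega
      simp only [hb, if_false]
      rw [ht]
      simp [pvMk]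
    | cons b t' =>
      have hblen : (pre.length : Int) + 1 < (bs.length : Int) := by
        subst hpre; simp only [List.length_append, List.length_cons]; push_cast; omega
      have hget : PySem.List.pyGet? bs ((pre.length : Int) + 1) = some b := by
        subst hpre
        have : ((pre.length : Int) + 1) = ((pre.length + 1 : Nat) : Int) := by push_cast; ring
        rw [this, PySem.List.pyGet?_natCast]
        rw [List.getElem?_append_right (by omega)]
        simp
      simp only [hblen, if_true, hget]
      rw [ht]
      simp [pvMk, List.append_assoc]

def pvOptList (p : Option (String × Int)) : List (String × Int) :=
  match p with
  | some q => [q]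
  | none => []

def pvFinalize (n : Int) (st : List (String × Int × Int) × Option (String × Int)) :
    List (String × Int × Int) :=
  match st.2 with
  | some q => st.1 ++ [(q.1, q.2 + 1, n)]
  | none => st.1

lemma pvAltFold (n : Int) (lines : List String) :
    ∀ (i : Int) (acc : List (String × Int × Int)) (pending : Option (String × Int)),
    pvFinalize n
      ((PySem.List.enumerate lines i).foldl
        (fun (st : List (String × Int × Int) × Option (String × Int)) p =>
          if pvHeaders.contains p.2 then
            (match st.2 with
             | some q => st.1 ++ [(q.1, q.2 + 1, p.1)]
             | none => st.1,
             some (p.2, p.1))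
          else st)
        (acc, pending))
      = acc ++ pvMk (pvOptList pending ++ pvBoundsFrom lines i) n := by
  induction lines with
  | nil =>
    intro i acc pending
    cases pending with
    | none => simp [PySem.List.enumerate_nil, pvFinalize, pvOptList, pvBoundsFrom, pvMk]
    | some q => simp [PySem.List.enumerate_nil, pvFinalize, pvOptList, pvBoundsFrom, pvMk]
  | cons l ls ih =>
    intro i acc pending
    rw [PySem.List.enumerate_cons]
    simp only [List.foldl_cons, pvBoundsFrom]
    by_cases h : pvHeaders.contains l
    · cases pending with
      | none =>
        simp only [h, if_true]
        rw [ih (i + 1) acc (some (l, i))]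
        simp [pvOptList]
      | some q =>
        simp only [h, if_true]
        rw [ih (i + 1) (acc ++ [(q.1, q.2 + 1, i)]) (some (l, i))]
        simp [pvOptList, pvMk, List.append_assoc]
    · simp only [h]
      exact ih (i + 1) acc pending

-- ===== VERDICT (by name: the statement is the Claim_ definition above) =====
theorem detect_section_boundaries_spec : Claim_equal_detect_section_boundaries := by
  intro lines _
  unfold Spec_detect_section_boundaries detect_section_boundaries detect_section_boundaries_alt
  simp only []
  rw [pvBoundsFold lines 0 []]
  rw [List.nil_append]
  rw [pvSecFold (lines.length : Int) (pvBoundsFrom lines 0) (pvBoundsFrom lines 0) [] 0 rfl (by simp) []]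
  have hb := pvAltFold (lines.length : Int) lines 0 [] none
  simp only [pvOptList, List.nil_append] at hb
  unfold pvFinalize at hb
  simp only [List.nil_append]
  exact hb.symm
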